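-- pv_equiv track=rewrite | github.com/mehfluffy/project-euler-0004 | main.py | generate_factors
-- ===== SOURCE A (Python) =====
-- from typing import Iterator
--
-- def generate_factors(pool: tuple) -> Iterator:
--     indices = [0, 0]
--     # Mutate indices to traverse upper triangle of permutations by column
--     while indices[1] < len(pool) - 1:
--         yield tuple(pool[i] for i in indices)
--         if indices[0] == indices[1]:
--             indices = [0, indices[1] + 1]  # first row of next column
--             yield tuple(pool[i] for i in indices)
--         indices[0] += 1
-- ===== SOURCE B (Python) =====
-- def generate_factors(pool: tuple):
--     n = len(pool)
--     for j in range(n - 1):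
--         for i in range(j + 1):
--             yield (pool[i], pool[j])
--     if n >= 2:
--         yield (pool[0], pool[n - 1])
-- ===== Notes on version B (the rewrite author's own statement) =====
-- stated objective: simpler
-- what changed: Replaces A's while-loop over a mutated two-element index list by two plain nested for-loops over the columns plus the one guarded trailing first-row pair A emits for the last column; avoiding the per-pair tuple(generator) construction and list mutation also makes it measurably faster.
import Mathlib
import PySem

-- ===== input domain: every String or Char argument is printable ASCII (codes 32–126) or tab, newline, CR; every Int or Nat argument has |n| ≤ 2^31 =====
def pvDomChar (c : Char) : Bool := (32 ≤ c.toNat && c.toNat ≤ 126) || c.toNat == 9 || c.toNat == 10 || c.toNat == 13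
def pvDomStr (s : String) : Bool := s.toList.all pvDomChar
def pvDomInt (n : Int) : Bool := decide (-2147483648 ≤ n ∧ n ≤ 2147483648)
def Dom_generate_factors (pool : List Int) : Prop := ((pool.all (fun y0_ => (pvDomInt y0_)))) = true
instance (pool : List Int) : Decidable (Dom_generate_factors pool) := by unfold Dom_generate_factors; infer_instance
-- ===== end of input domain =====

-- B replaces A's while-loop over a mutated two-element index list by two plain
-- nested for-loops (columns of the upper triangle) plus the single trailing
-- first-row pair of the last column that A also emits; return value only
-- (both Pythons are generators; the ports return the list of yielded pairs).

-- ===== PORT A =====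
-- The while loop as recursion on the index pair (i0, i1) (Python's `indices`).
-- The invariant i0 ≤ i1 (carried as `h`) holds on every state the Python loop
-- reaches from [0, 0] and justifies termination. `pool.getD i 0` is Python's
-- pool[i]: every index used is in range, so the default is never taken.
def pvLoopA (pool : List Int) (i0 i1 : Nat) (h : i0 ≤ i1) : List (Int × Int) :=
  if _hc : (i1 : Int) < (pool.length : Int) - 1 then
    if he : i0 = i1 then
      (pool.getD i0 0, pool.getD i1 0) :: (pool.getD 0 0, pool.getD (i1 + 1) 0) ::
        pvLoopA pool 1 (i1 + 1) (by omega)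
    else
      (pool.getD i0 0, pool.getD i1 0) :: pvLoopA pool (i0 + 1) i1 (by omega)
  else []
termination_by (pool.length - 1 - i1, i1 - i0)
decreasing_by
  · left; omega
  · right; omega

def generate_factors (pool : List Int) : List (Int × Int) :=
  pvLoopA pool 0 0 (Nat.le_refl 0)

-- ===== PORT B =====
def generate_factors_alt (pool : List Int) : List (Int × Int) :=
  let n := pool.length
  ((List.range (n - 1)).flatMap (fun j =>
      (List.range (j + 1)).map (fun i => (pool.getD i 0, pool.getD j 0))))
    ++ (if 2 ≤ n then [(pool.getD 0 0, pool.getD (n - 1) 0)] else [])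

-- ===== PRECONDITION & SPEC =====
def Spec_generate_factors (pool : List Int) (out : List (Int × Int)) : Prop := out = generate_factors_alt pool
instance (pool : List Int) (out : List (Int × Int)) : Decidable (Spec_generate_factors pool out) := by unfold Spec_generate_factors; infer_instance

-- ===== CLAIM (what is proved, stated in full; the proofs are below) =====
def Claim_equal_generate_factors : Prop := ∀ (pool : List Int), Dom_generate_factors pool → Spec_generate_factors pool (generate_factors pool)

-- ===== LEMMAS AND PROOFS =====

-- one column j of the upper triangle, as B builds it
def pvCol (pool : List Int) (j : Nat) : List (Int × Int) :=
  (List.range (j + 1)).map (fun i => (pool.getD i 0, pool.getD j 0))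

-- everything A still emits once its column index has reached c (2 ≤ pool.length, c ≤ pool.length - 1):
-- the full columns c, …, pool.length - 2 and then the lone first-row pair of the last column
def pvTail (pool : List Int) (c : Nat) : List (Int × Int) :=
  (List.range' c (pool.length - 1 - c)).flatMap (pvCol pool)
    ++ [(pool.getD 0 0, pool.getD (pool.length - 1) 0)]

lemma pvCol_drop_self (pool : List Int) (j : Nat) :
    (pvCol pool j).drop j = [(pool.getD j 0, pool.getD j 0)] := by
  rw [pvCol, List.range_succ, List.map_append, List.drop_left']
  · rfl
  · simp

lemma pvLoopA_eq (pool : List Int) (i0 j : Nat) (h : i0 ≤ j) :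
    pvLoopA pool i0 j h =
      if j + 1 < pool.length then (pvCol pool j).drop i0 ++ pvTail pool (j + 1) else [] := by
  fun_induction pvLoopA pool i0 j h with
  | case1 j hc h ih =>
    have hj : j + 1 < pool.length := by omega
    rw [ih, if_pos hj, pvCol_drop_self]
    by_cases h2 : j + 1 + 1 < pool.length
    · -- column j+1 is not the last: pvTail (j+1) = pvCol (j+1) ++ pvTail (j+2)
      rw [if_pos h2]
      have hr : List.range' (j + 1) (pool.length - 1 - (j + 1))
          = (j + 1) :: List.range' (j + 1 + 1) (pool.length - 1 - (j + 1 + 1)) := by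
        rw [show pool.length - 1 - (j + 1) = (pool.length - 1 - (j + 1 + 1)) + 1 from by omega,
          List.range'_succ]
      have hstep : pvTail pool (j + 1) = pvCol pool (j + 1) ++ pvTail pool (j + 1 + 1) := by
        rw [pvTail, pvTail, hr, List.flatMap_cons, List.append_assoc]
      have hcol : pvCol pool (j + 1)
          = (pool.getD 0 0, pool.getD (j + 1) 0)
              :: ((List.range (j + 1)).map (· + 1)).map
                   (fun i => (pool.getD i 0, pool.getD (j + 1) 0)) := by
        simp [pvCol, List.range_succ_eq_map, List.map_map]
      have hdrop : (pvCol pool (j + 1)).drop 1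
          = ((List.range (j + 1)).map (· + 1)).map
              (fun i => (pool.getD i 0, pool.getD (j + 1) 0)) := by
        rw [hcol, List.drop_one, List.tail_cons]
      rw [hstep, hcol]
      simp
    · -- column j+1 is the last: only its first-row pair remains
      have hlast : j + 1 = pool.length - 1 := by omega
      rw [if_neg h2, pvTail]
      simp [hlast]
  | case2 i0 j h hc he ih =>
    have hj : j + 1 < pool.length := by omega
    rw [ih, if_pos hj, if_pos hj]
    have hi0 : i0 < (pvCol pool j).length := by simp [pvCol]; omega
    rw [List.drop_eq_getElem_cons hi0]
    have hget : (pvCol pool j)[i0] = (pool.getD i0 0, pool.getD j 0) := by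
      simp [pvCol]
    rw [hget]
    simp
  | case3 i0 j h hc =>
    have : ¬ (j + 1 < pool.length) := by omega
    simp [this]

lemma generate_factors_eq_alt (pool : List Int) :
    generate_factors pool = generate_factors_alt pool := by
  rw [generate_factors, pvLoopA_eq]
  by_cases h2 : 2 ≤ pool.length
  · have h1 : 0 + 1 < pool.length := by omega
    simp only [if_pos h1]
    have hr : List.range (pool.length - 1)
        = 0 :: List.range' 1 (pool.length - 1 - 1) := by
      rw [List.range_eq_range']
      rw [show pool.length - 1 = (pool.length - 1 - 1) + 1 from by omega, List.range'_succ]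
      norm_num
    rw [generate_factors_alt]
    simp only [hr, List.flatMap_cons, if_pos h2]
    rw [pvTail]
    have hfun : pvCol pool = fun j => (List.range (j + 1)).map (fun i => (pool.getD i 0, pool.getD j 0)) := by
      funext j; rfl
    rw [hfun]
    simp
  · have h1 : ¬ (0 + 1 < pool.length) := by omega
    simp only [if_neg h1]
    rw [generate_factors_alt]
    have : pool.length - 1 = 0 ∨ pool.length = 2 := by omega
    interval_cases hl : pool.length <;> simp_all
    
-- ===== VERDICT (by name: the statement is the Claim_ definition above) =====
theorem generate_factors_spec : Claim_equal_generate_factors := by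
  intro pool _
  unfold Spec_generate_factors
  exact generate_factors_eq_alt pool
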